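-- pv_equiv track=rewrite | github.com/Ashwin-Baduni/AI-Powered_Analytics_Dashboard_Chatbot | backend/main.py | process_time_relative_query
-- ===== SOURCE A (Python) =====
-- def process_time_relative_query(query, current_datetime):
--     """Process queries with relative time references like 'last year' or 'next month'."""
--     query_lower = query.lower()
--
--     # Map relative time terms to actual years
--     current_year = current_datetime['year']
--     time_mappings = {
--         'last year': current_year - 1,
--         'this year': current_year,
--         'next year': current_year + 1,
--         'previous year': current_year - 1,
--         'coming year': current_year + 1,
--         'two years ago': current_year - 2,
--         'three years ago': current_year - 3,
--         'last decade': (current_year - 10, current_year - 1)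
--     }
--
--     # Replace relative terms with actual years
--     modified_query = query_lower
--     for term, year_value in time_mappings.items():
--         if term in query_lower:
--             if isinstance(year_value, tuple):
--                 modified_query = modified_query.replace(term, f"from {year_value[0]} to {year_value[1]}")
--             else:
--                 modified_query = modified_query.replace(term, str(year_value))
--
--     return modified_query if modified_query != query_lower else None
-- ===== SOURCE B (Python) =====
-- def process_time_relative_query(query, current_datetime):
--     """Process queries with relative time references like 'last year' or 'next month'."""
--     ql = query.lower()
--     y = current_datetime['year']
--     table = [
--         ('last year', str(y - 1)),
--         ('this year', str(y)),
--         ('next year', str(y + 1)),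
--         ('previous year', str(y - 1)),
--         ('coming year', str(y + 1)),
--         ('two years ago', str(y - 2)),
--         ('three years ago', str(y - 3)),
--         ('last decade', f"from {y - 10} to {y - 1}"),
--     ]
--     out = []
--     i = 0
--     n = len(ql)
--     while i < n:
--         for term, rep in table:
--             if ql.startswith(term, i):
--                 out.append(rep)
--                 i += len(term)
--                 break
--         else:
--             out.append(ql[i])
--             i += 1
--     modified = ''.join(out)
--     return modified if modified != ql else None
-- ===== Notes on version B (the rewrite author's own statement) =====
-- stated objective: alternative
-- what changed: A makes 8 sequential full-string str.replace passes (each rescanning and rebuilding the whole query); B lowercases once and does a single left-to-right scan that at each position dispatches on the first matching phrase of the table and emits its already-formatted replacement, so the string is traversed and rebuilt once.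
import Mathlib
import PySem

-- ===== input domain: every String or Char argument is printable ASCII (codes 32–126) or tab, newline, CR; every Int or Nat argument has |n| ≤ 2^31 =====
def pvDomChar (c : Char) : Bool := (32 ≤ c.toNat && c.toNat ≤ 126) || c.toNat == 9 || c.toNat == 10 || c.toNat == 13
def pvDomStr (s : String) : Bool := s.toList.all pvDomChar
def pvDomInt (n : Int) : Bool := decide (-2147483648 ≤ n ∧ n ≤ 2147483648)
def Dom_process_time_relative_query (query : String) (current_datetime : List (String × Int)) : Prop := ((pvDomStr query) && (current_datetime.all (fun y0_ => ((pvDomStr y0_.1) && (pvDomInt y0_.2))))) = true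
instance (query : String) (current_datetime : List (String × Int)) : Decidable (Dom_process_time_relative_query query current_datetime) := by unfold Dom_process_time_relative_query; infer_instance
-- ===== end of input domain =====

-- B is a single left-to-right scan with a dispatch table instead of A's eight sequential
-- full-string replace passes; equal return value proved on Pre_ (the 'year' key present).

-- the f-string f"from {a} to {b}" (identical in both Pythons)
def pvDecadeRep (a b : Int) : List Char :=
  ['f','r','o','m',' '] ++ PySem.Int.toChars a ++ [' ','t','o',' '] ++ PySem.Int.toChars b

-- ===== PORT A =====
-- string operations are ported on the List Char side (PySem.Chars), as PySem prescribes
def process_time_relative_query (query : String) (current_datetime : List (String × Int)) : Option String :=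
  let query_lower := PySem.Chars.lower query.toList
  match (PySem.Dict.mk current_datetime).get? "year" with
  | none => none  -- unreachable under Pre_: Python raises KeyError here
  | some current_year =>
    let time_mappings : List (List Char × (Int ⊕ (Int × Int))) :=
      [ (['l','a','s','t',' ','y','e','a','r'], .inl (current_year - 1)),
        (['t','h','i','s',' ','y','e','a','r'], .inl current_year),
        (['n','e','x','t',' ','y','e','a','r'], .inl (current_year + 1)),
        (['p','r','e','v','i','o','u','s',' ','y','e','a','r'], .inl (current_year - 1)),
        (['c','o','m','i','n','g',' ','y','e','a','r'], .inl (current_year + 1)),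
        (['t','w','o',' ','y','e','a','r','s',' ','a','g','o'], .inl (current_year - 2)),
        (['t','h','r','e','e',' ','y','e','a','r','s',' ','a','g','o'], .inl (current_year - 3)),
        (['l','a','s','t',' ','d','e','c','a','d','e'], .inr (current_year - 10, current_year - 1)) ]
    let modified_query := time_mappings.foldl (fun acc tv =>
      if PySem.Chars.isIn tv.1 query_lower then
        match tv.2 with
        | .inr ab => PySem.Chars.replace acc tv.1 (pvDecadeRep ab.1 ab.2)
        | .inl v => PySem.Chars.replace acc tv.1 (PySem.Int.toChars v)
      else acc) query_lower
    if modified_query = query_lower then none else some (String.ofList modified_query)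

-- ===== PORT B =====
-- B's dispatch table: (phrase, already-formatted replacement), in B's list order
def pvTable (y : Int) : List (List Char × List Char) :=
  [ (['l','a','s','t',' ','y','e','a','r'], PySem.Int.toChars (y - 1)),
    (['t','h','i','s',' ','y','e','a','r'], PySem.Int.toChars y),
    (['n','e','x','t',' ','y','e','a','r'], PySem.Int.toChars (y + 1)),
    (['p','r','e','v','i','o','u','s',' ','y','e','a','r'], PySem.Int.toChars (y - 1)),
    (['c','o','m','i','n','g',' ','y','e','a','r'], PySem.Int.toChars (y + 1)),
    (['t','w','o',' ','y','e','a','r','s',' ','a','g','o'], PySem.Int.toChars (y - 2)),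
    (['t','h','r','e','e',' ','y','e','a','r','s',' ','a','g','o'], PySem.Int.toChars (y - 3)),
    (['l','a','s','t',' ','d','e','c','a','d','e'], pvDecadeRep (y - 10) (y - 1)) ]

theorem pvTable_ne (y : Int) : ∀ pr ∈ pvTable y, pr.1 ≠ [] := by
  intro pr h
  simp only [pvTable, List.mem_cons, List.not_mem_nil, or_false] at h
  rcases h with rfl | rfl | rfl | rfl | rfl | rfl | rfl | rfl <;> simp

-- B's while loop: at each position, first matching phrase of the table is emitted
-- (its replacement) and skipped, otherwise the character is copied
def pvScan (table : List (List Char × List Char)) (hne : ∀ pr ∈ table, pr.1 ≠ []) : List Char → List Char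
  | [] => []
  | c :: t =>
    match hm : table.find? (fun pr => pr.1.isPrefixOf (c :: t)) with
    | some pr => pr.2 ++ pvScan table hne ((c :: t).drop pr.1.length)
    | none => c :: pvScan table hne t
termination_by l => l.length
decreasing_by
  · have h1 : pr.1 ≠ [] := hne pr (List.mem_of_find?_eq_some hm)
    have h3 : 0 < pr.1.length := List.length_pos_of_ne_nil h1
    simp only [List.length_drop, List.length_cons]
    omega
  · simp

def process_time_relative_query_alt (query : String) (current_datetime : List (String × Int)) : Option String :=
  let ql := PySem.Chars.lower query.toList
  match (PySem.Dict.mk current_datetime).get? "year" with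
  | none => none  -- unreachable under Pre_: Python raises KeyError here
  | some y =>
    let modified := pvScan (pvTable y) (pvTable_ne y) ql
    if modified = ql then none else some (String.ofList modified)

-- ===== PRECONDITION & SPEC =====
-- Pre_ excludes exactly the inputs where Python A raises KeyError: no 'year' key
def Pre_process_time_relative_query (query : String) (current_datetime : List (String × Int)) : Prop :=
  "year" ∈ current_datetime.map Prod.fst
instance (query : String) (current_datetime : List (String × Int)) : Decidable (Pre_process_time_relative_query query current_datetime) := by unfold Pre_process_time_relative_query; infer_instance

def pvWitness_process_time_relative_query : String × (List (String × Int)) :=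
  ("Show sales for last year", [("year", 2024)])

def Spec_process_time_relative_query (query : String) (current_datetime : List (String × Int)) (out : Option String) : Prop := out = process_time_relative_query_alt query current_datetime
instance (query : String) (current_datetime : List (String × Int)) (out : Option String) : Decidable (Spec_process_time_relative_query query current_datetime out) := by unfold Spec_process_time_relative_query; infer_instance

-- ===== CLAIM (what is proved, stated in full; the proofs are below) =====
def Claim_equal_process_time_relative_query : Prop := ∀ (query : String) (current_datetime : List (String × Int)), Dom_process_time_relative_query query current_datetime → Pre_process_time_relative_query query current_datetime → Spec_process_time_relative_query query current_datetime (process_time_relative_query query current_datetime)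

-- ===== LEMMAS AND PROOFS =====

-- ---- the eight phrases, and decidable combinatorial facts about them ----
def pvPats : List (List Char) :=
  [ ['l','a','s','t',' ','y','e','a','r'],
    ['t','h','i','s',' ','y','e','a','r'],
    ['n','e','x','t',' ','y','e','a','r'],
    ['p','r','e','v','i','o','u','s',' ','y','e','a','r'],
    ['c','o','m','i','n','g',' ','y','e','a','r'],
    ['t','w','o',' ','y','e','a','r','s',' ','a','g','o'],
    ['t','h','r','e','e',' ','y','e','a','r','s',' ','a','g','o'],
    ['l','a','s','t',' ','d','e','c','a','d','e'] ]

-- chars that can start an inserted replacement (digit, minus sign, 'f' of "from")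
def pvGoodC (c : Char) : Bool := c.isDigit || c == '-' || c == 'f'
-- c cannot start any phrase
def pvHeadOK (c : Char) : Bool := pvPats.all (fun p => p.head? != some c)

theorem fact_ne : ∀ p ∈ pvPats, p ≠ [] := by decide
theorem fact_len2 : ∀ p ∈ pvPats, 2 ≤ p.length := by decide
theorem drop_append_ge {α : Type} {a b : List α} {j : Nat} (h : a.length ≤ j) :
    (a ++ b).drop j = b.drop (j - a.length) := by
  rw [List.drop_append]
  simp [List.drop_eq_nil_of_le h]

theorem fact_chars : ∀ p ∈ pvPats, ∀ c ∈ p, pvGoodC c = false := by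
  have h : pvPats.all (fun p => p.all (fun c => !pvGoodC c)) = true := by decide
  simp only [List.all_eq_true, Bool.not_eq_true'] at h
  exact h
theorem fact_to : ∀ p ∈ pvPats, p.take 2 ≠ ['t','o'] := by decide
theorem fact_overlap : ∀ p ∈ pvPats, ∀ p' ∈ pvPats, ∀ j, j < p.length → 0 < j →
    ¬ (p' <+: p.drop j) ∧ ¬ (p.drop j <+: p') := by
  have h : pvPats.all (fun p => pvPats.all (fun p' =>
      (List.range p.length).all (fun j => decide (0 < j) →
        (!(p'.isPrefixOf (p.drop j)) && !((p.drop j).isPrefixOf p'))))) = true := by decide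
  simp only [List.all_eq_true, List.mem_range, Bool.and_eq_true, Bool.not_eq_true',
    decide_implies, decide_eq_true_eq] at h
  intro p hp p' hp' j hj hj0
  have h2 := h p hp p' hp' j hj
  simp [hj0] at h2
  exact ⟨by simp [← List.isPrefixOf_iff_prefix, h2.1],
         by simp [← List.isPrefixOf_iff_prefix, h2.2]⟩

theorem pvHeadOK_goodC (c : Char) (h : pvGoodC c = true) : pvHeadOK c = true := by
  by_contra hc
  have hmem : ∃ p ∈ pvPats, p.head? = some c := by
    simp only [pvHeadOK, List.all_eq_true, bne_iff_ne, ne_eq, not_forall] at hc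
    obtain ⟨p, hp, hph⟩ := hc
    exact ⟨p, hp, by simpa using hph⟩
  obtain ⟨p, hp, hph⟩ := hmem
  have hcp : c ∈ p := by
    cases p with
    | nil => simp at hph
    | cons a t => simp at hph; simp [hph]
  have := fact_chars p hp c hcp
  rw [h] at this
  exact Bool.true_eq_false.mp this

theorem headOK_no_prefix {c : Char} (hok : pvHeadOK c = true) {p : List Char}
    (hp : p ∈ pvPats) {rest : List Char} : ¬ p <+: (c :: rest) := by
  intro hpre
  cases p with
  | nil => exact fact_ne _ hp rfl
  | cons a q =>
    rw [List.cons_prefix_cons] at hpre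
    simp only [pvHeadOK, List.all_eq_true, bne_iff_ne, ne_eq] at hok
    exact hok _ hp (by simp [hpre.1])

-- ---- prefix / occurrence toolbox ----
theorem prefix_append_cases {α : Type} {p u v : List α} (h : p <+: u ++ v) :
    p <+: u ∨ ∃ q, p = u ++ q ∧ q <+: v := by
  by_cases hl : p.length ≤ u.length
  · exact Or.inl (List.prefix_of_prefix_length_le h (List.prefix_append u v) hl)
  · right
    have hu : u <+: p := List.prefix_of_prefix_length_le (List.prefix_append u v) h (by omega)
    obtain ⟨q, rfl⟩ := hu
    refine ⟨q, rfl, ?_⟩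
    obtain ⟨t, ht⟩ := h
    rw [List.append_assoc] at ht
    have := List.append_cancel_left ht
    exact ⟨t, this⟩

theorem prefix_cons_cases {α : Type} {p t : List α} {c : α} (h : p <+: c :: t) :
    p = [] ∨ ∃ q, p = c :: q ∧ q <+: t := by
  cases p with
  | nil => exact Or.inl rfl
  | cons a q =>
    rw [List.cons_prefix_cons] at h
    exact Or.inr ⟨q, by rw [h.1], h.2⟩

def pvOcc (p s : List Char) : Prop := ∃ j, p <+: s.drop j

theorem occ_cons {p t : List Char} {c : Char} : pvOcc p (c :: t) ↔ p <+: (c :: t) ∨ pvOcc p t := by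
  constructor
  · rintro ⟨j, hj⟩
    cases j with
    | zero => exact Or.inl (by simpa using hj)
    | succ j => exact Or.inr ⟨j, by simpa using hj⟩
  · rintro (h | ⟨j, hj⟩)
    · exact ⟨0, by simpa using h⟩
    · exact ⟨j + 1, by simpa using hj⟩

theorem occ_drop {p s : List Char} {n : Nat} (h : pvOcc p (s.drop n)) : pvOcc p s := by
  obtain ⟨j, hj⟩ := h
  exact ⟨n + j, by simpa [List.drop_drop, Nat.add_comm] using hj⟩

theorem occ_append_elim {p u v : List Char} (h : pvOcc p (u ++ v)) :
    (∃ j, j < u.length ∧ p <+: (u.drop j ++ v)) ∨ pvOcc p v := by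
  obtain ⟨j, hj⟩ := h
  by_cases hl : j < u.length
  · exact Or.inl ⟨j, hl, by rwa [List.drop_append_of_le_length (by omega)] at hj⟩
  · right
    refine ⟨j - u.length, ?_⟩
    rwa [drop_append_ge (by omega)] at hj

theorem occ_iff_isIn {p s : List Char} : pvOcc p s ↔ PySem.Chars.isIn p s = true := by
  unfold pvOcc
  exact PySem.Chars.exists_prefix_drop_iff_isIn p s

-- ---- replacement strings: inert (no phrase can start inside them), good head ----
def pvInert (r : List Char) : Prop :=
  ∀ j, j < r.length → ∀ w p, p ∈ pvPats → ¬ p <+: (r.drop j ++ w)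

def pvGoodEntry (pr : List Char × List Char) : Prop :=
  pr.1 ∈ pvPats ∧ pr.2 ≠ [] ∧ pvInert pr.2 ∧ (∃ c bs, pr.2 = c :: bs ∧ pvGoodC c = true)

theorem inert_of_headOK {r : List Char} (hr : ∀ ch ∈ r, pvHeadOK ch = true) : pvInert r := by
  intro j hj w p hp hpre
  rw [List.drop_eq_getElem_cons hj, List.cons_append] at hpre
  exact headOK_no_prefix (hr r[j] (List.getElem_mem hj)) hp hpre

theorem inert_append {a b : List Char} (ha : pvInert a) (hb : pvInert b) : pvInert (a ++ b) := by
  intro j hj w p hp hpre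
  by_cases hl : j < a.length
  · rw [List.drop_append_of_le_length (by omega), List.append_assoc] at hpre
    exact ha j hl (b ++ w) p hp hpre
  · rw [drop_append_ge (by omega)] at hpre
    have : j - a.length < b.length := by simp at hj; omega
    exact hb (j - a.length) this w p hp hpre

theorem digitChar_isDigit (n : Nat) : (Nat.digitChar (n % 10)).isDigit = true := by
  have h : n % 10 < 10 := Nat.mod_lt _ (by omega)
  set m := n % 10 with hm
  interval_cases m <;> decide

theorem toDigitsCore_chars : ∀ (fuel n : Nat) (ds : List Char),
    (∀ c ∈ ds, c.isDigit = true) → ∀ c ∈ Nat.toDigitsCore 10 fuel n ds, c.isDigit = true := by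
  intro fuel
  induction fuel with
  | zero => intro n ds h c hc; rw [Nat.toDigitsCore] at hc; exact h c hc
  | succ fuel ih =>
    intro n ds h c hc
    rw [Nat.toDigitsCore] at hc
    split at hc
    · rcases List.mem_cons.mp hc with rfl | hmem
      · exact digitChar_isDigit n
      · exact h c hmem
    · refine ih (n / 10) _ ?_ c hc
      intro c' hc'
      rcases List.mem_cons.mp hc' with rfl | hmem
      · exact digitChar_isDigit n
      · exact h c' hmem

theorem toDigits_chars : ∀ n : Nat, ∀ c ∈ Nat.toDigits 10 n, c.isDigit = true := by
  intro n c hc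
  exact toDigitsCore_chars (n + 1) n [] (by simp) c hc

theorem toDigitsCore_suffix : ∀ (fuel n : Nat) (ds : List Char),
    ds <:+ Nat.toDigitsCore 10 fuel n ds := by
  intro fuel
  induction fuel with
  | zero => intro n ds; rw [Nat.toDigitsCore]
  | succ fuel ih =>
    intro n ds
    rw [Nat.toDigitsCore]
    split
    · exact List.suffix_cons _ _
    · exact (List.suffix_cons _ _).trans (ih (n / 10) _)

theorem toDigits_ne : ∀ n : Nat, Nat.toDigits 10 n ≠ [] := by
  intro n h
  unfold Nat.toDigits at h
  rw [Nat.toDigitsCore] at h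
  split at h
  · exact List.cons_ne_nil _ _ h
  · have := toDigitsCore_suffix n (n / 10) [(n % 10).digitChar]
    rw [h] at this
    simp at this

theorem toChars_chars (n : Int) : ∀ c ∈ PySem.Int.toChars n, pvGoodC c = true := by
  intro c hc
  unfold PySem.Int.toChars at hc
  split at hc
  · rcases List.mem_cons.mp hc with rfl | hmem
    · decide
    · simp [pvGoodC, toDigits_chars _ c hmem]
  · simp [pvGoodC, toDigits_chars _ c hc]

theorem toChars_ne (n : Int) : PySem.Int.toChars n ≠ [] := by
  unfold PySem.Int.toChars
  split
  · simp
  · exact toDigits_ne _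

theorem toChars_goodHead (n : Int) :
    ∃ c bs, PySem.Int.toChars n = c :: bs ∧ pvGoodC c = true := by
  obtain ⟨c, bs, h⟩ := List.exists_cons_of_ne_nil (toChars_ne n)
  exact ⟨c, bs, h, toChars_chars n c (by simp [h])⟩

theorem toChars_inert (n : Int) : pvInert (PySem.Int.toChars n) := by
  exact inert_of_headOK (fun ch hch => pvHeadOK_goodC ch (toChars_chars n ch hch))

theorem inert_mid : pvInert [' ','t','o',' '] := by
  intro j hj w p hp hpre
  simp only [List.length_cons, List.length_nil] at hj
  interval_cases j
  · exact headOK_no_prefix (by decide) hp hpre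
  · rcases prefix_cons_cases hpre with rfl | ⟨q, rfl, hq⟩
    · exact fact_ne _ hp rfl
    · rcases prefix_cons_cases hq with rfl | ⟨q2, rfl, _⟩
      · have := fact_len2 _ hp; simp at this
      · exact fact_to _ hp rfl
  · exact headOK_no_prefix (by decide) hp hpre
  · exact headOK_no_prefix (by decide) hp hpre

set_option maxRecDepth 4000 in
theorem decade_inert (a b : Int) : pvInert (pvDecadeRep a b) := by
  unfold pvDecadeRep
  refine inert_append (inert_append (inert_append ?_ (toChars_inert a)) inert_mid) (toChars_inert b)
  exact inert_of_headOK (by intro ch hch; fin_cases hch <;> decide)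

theorem table_good (y : Int) : ∀ pr ∈ pvTable y, pvGoodEntry pr := by
  intro pr h
  simp only [pvTable, List.mem_cons, List.not_mem_nil, or_false] at h
  rcases h with rfl | rfl | rfl | rfl | rfl | rfl | rfl | rfl
  · exact ⟨by simp [pvPats], toChars_ne _, toChars_inert _, toChars_goodHead _⟩
  · exact ⟨by simp [pvPats], toChars_ne _, toChars_inert _, toChars_goodHead _⟩
  · exact ⟨by simp [pvPats], toChars_ne _, toChars_inert _, toChars_goodHead _⟩
  · exact ⟨by simp [pvPats], toChars_ne _, toChars_inert _, toChars_goodHead _⟩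
  · exact ⟨by simp [pvPats], toChars_ne _, toChars_inert _, toChars_goodHead _⟩
  · exact ⟨by simp [pvPats], toChars_ne _, toChars_inert _, toChars_goodHead _⟩
  · exact ⟨by simp [pvPats], toChars_ne _, toChars_inert _, toChars_goodHead _⟩
  · refine ⟨by simp [pvPats], by simp [pvDecadeRep], decade_inert _ _, ?_⟩
    refine ⟨'f', ['r','o','m',' '] ++ PySem.Int.toChars (y - 10) ++ [' ','t','o',' '] ++ PySem.Int.toChars (y - 1), ?_, by decide⟩
    simp [pvDecadeRep]

-- ---- pvRepl: structural form of Python str.replace (old nonempty) ----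
def pvRepl (old new : List Char) (hne : old ≠ []) : List Char → List Char
  | [] => []
  | c :: t =>
    if old.isPrefixOf (c :: t) then new ++ pvRepl old new hne ((c :: t).drop old.length)
    else c :: pvRepl old new hne t
termination_by l => l.length
decreasing_by
  · have h3 : 0 < old.length := List.length_pos_of_ne_nil hne
    simp only [List.length_drop, List.length_cons]
    omega
  · simp

theorem pvRepl_nil {old new : List Char} (h : old ≠ []) : pvRepl old new h [] = [] := by
  rw [pvRepl]

theorem pvRepl_cons_pos {old new t : List Char} {c : Char} (h : old ≠ [])
    (hp : old.isPrefixOf (c :: t) = true) :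
    pvRepl old new h (c :: t) = new ++ pvRepl old new h ((c :: t).drop old.length) := by
  rw [pvRepl]; simp [hp]

theorem pvRepl_cons_neg {old new t : List Char} {c : Char} (h : old ≠ [])
    (hp : ¬ old.isPrefixOf (c :: t) = true) :
    pvRepl old new h (c :: t) = c :: pvRepl old new h t := by
  rw [pvRepl]; simp [hp]

theorem go_spec {old new : List Char} (h : old ≠ []) : ∀ (fuel : Nat) (l acc : List Char),
    l.length ≤ fuel →
    PySem.Chars.replace.go old new fuel l acc = acc.reverse ++ pvRepl old new h l := by
  intro fuel
  induction fuel with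
  | zero =>
    intro l acc hl
    have hl0 : l = [] := by cases l <;> simp_all
    subst hl0
    rw [PySem.Chars.replace.go, pvRepl_nil]
  | succ fuel ih =>
    intro l acc hl
    cases l with
    | nil =>
      rw [PySem.Chars.replace.go, pvRepl_nil]
      all_goals simp
    | cons c t =>
      rw [PySem.Chars.replace.go]
      by_cases hp : old.isPrefixOf (c :: t) = true
      · have holdlen : old.length ≤ (c :: t).length :=
          (List.isPrefixOf_iff_prefix.mp hp).length_le
        have hold1 : 0 < old.length := List.length_pos_of_ne_nil h
        rw [if_pos hp, ih _ _ (by simp only [List.length_drop, List.length_cons] at *; omega),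
          pvRepl_cons_pos h hp]
        simp
      · rw [if_neg hp, ih _ _ (by simp at hl ⊢; omega), pvRepl_cons_neg h hp]
        simp

theorem replace_eq_pvRepl {old new : List Char} (h : old ≠ []) (s : List Char) :
    PySem.Chars.replace s old new = pvRepl old new h s := by
  unfold PySem.Chars.replace
  rw [if_neg (by simpa [List.isEmpty_iff] using h), go_spec h s.length s [] (le_refl _)]
  simp

-- ---- GP: a string and its image share a prefix; at the first difference the image
-- carries a character that cannot start a phrase ----
def pvGP (s s' : List Char) : Prop :=
  s' = s ∨ ∃ u a c bs, s = u ++ a ∧ s' = u ++ c :: bs ∧ pvGoodC c = true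

theorem gp_refl (s : List Char) : pvGP s s := Or.inl rfl

theorem gp_trans {s s1 s2 : List Char} (h1 : pvGP s s1) (h2 : pvGP s1 s2) : pvGP s s2 := by
  rcases h1 with rfl | ⟨u1, a1, c1, b1, hs, hs1, hg1⟩
  · exact h2
  rcases h2 with rfl | ⟨u2, a2, c2, b2, hs1', hs2, hg2⟩
  · exact Or.inr ⟨u1, a1, c1, b1, hs, hs1, hg1⟩
  by_cases hle : u2.length ≤ u1.length
  · have hpre2 : u2 <+: u1 :=
      List.prefix_of_prefix_length_le ⟨a2, hs1'.symm⟩ ⟨c1 :: b1, hs1.symm⟩ hle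
    obtain ⟨m, rfl⟩ := hpre2
    exact Or.inr ⟨u2, m ++ a1, c2, b2, by rw [hs, List.append_assoc], hs2, hg2⟩
  · have hpre1 : u1 <+: u2 :=
      List.prefix_of_prefix_length_le ⟨c1 :: b1, hs1.symm⟩ ⟨a2, hs1'.symm⟩ (by omega)
    obtain ⟨m, rfl⟩ := hpre1
    have hm : m ++ a2 = c1 :: b1 := by
      apply List.append_cancel_left (as := u1)
      rw [← List.append_assoc, ← hs1', hs1]
    cases m with
    | nil => simp at hle
    | cons d m' =>
      have hd : d = c1 := by simpa using congrArg (·.head?) hm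
      subst hd
      exact Or.inr ⟨u1, a1, d, m' ++ c2 :: b2, hs, by rw [hs2]; simp, hg1⟩

theorem gp_pullback {s s' q : List Char} (h : pvGP s s')
    (hq : ∀ c ∈ q, pvGoodC c = false) (hpre : q <+: s') : q <+: s := by
  rcases h with rfl | ⟨u, a, c, bs, rfl, rfl, hg⟩
  · exact hpre
  rcases prefix_append_cases hpre with hu | ⟨q', rfl, hq'⟩
  · exact hu.trans (List.prefix_append u a)
  rcases prefix_cons_cases hq' with rfl | ⟨q2, rfl, _⟩
  · simp only [List.append_nil]
    exact List.prefix_append u a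
  · have : pvGoodC c = false := hq c (by simp)
    rw [hg] at this
    exact absurd this (by simp)

theorem gp_repl {p r : List Char} (hne : p ≠ []) (hr : ∃ c bs, r = c :: bs ∧ pvGoodC c = true)
    (s : List Char) : pvGP s (pvRepl p r hne s) := by
  obtain ⟨rc, rbs, rfl, hg⟩ := hr
  suffices h : ∀ n (s : List Char), s.length ≤ n → pvGP s (pvRepl p (rc :: rbs) hne s) from
    h s.length s (le_refl _)
  intro n
  induction n with
  | zero =>
    intro s hs
    have : s = [] := by cases s <;> simp_all
    subst this
    rw [pvRepl_nil]
    exact gp_refl []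
  | succ n ih =>
    intro s hs
    cases s with
    | nil => rw [pvRepl_nil]; exact gp_refl []
    | cons c t =>
      by_cases hp : p.isPrefixOf (c :: t) = true
      · rw [pvRepl_cons_pos hne hp]
        exact Or.inr ⟨[], c :: t, rc, rbs ++ pvRepl p (rc :: rbs) hne ((c :: t).drop p.length),
          by simp, by simp, hg⟩
      · rw [pvRepl_cons_neg hne hp]
        rcases ih t (by simp at hs; omega) with heq | ⟨u, a, cc, bs, hta, htb, hgc⟩
        · exact Or.inl (by rw [heq])
        · exact Or.inr ⟨c :: u, a, cc, bs, by simp [hta], by simp [htb], hgc⟩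

-- ---- key semantic lemmas about a single replace ----
theorem skip_prefix {p r : List Char} (hne : p ≠ []) (u z : List Char)
    (hcond : ∀ j, j < u.length → ¬ p <+: (u.drop j ++ z)) :
    pvRepl p r hne (u ++ z) = u ++ pvRepl p r hne z := by
  induction u with
  | nil => simp
  | cons c u' ih =>
    have h0 : ¬ p <+: (c :: (u' ++ z)) := by
      have := hcond 0 (by simp)
      simpa using this
    rw [List.cons_append, pvRepl_cons_neg hne (by simpa [List.isPrefixOf_iff_prefix] using h0)]
    rw [ih (fun j hj => by simpa using hcond (j + 1) (by simp; omega))]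
    simp

theorem repl_id {p r : List Char} (hne : p ≠ []) {s : List Char} (h : ¬ pvOcc p s) :
    pvRepl p r hne s = s := by
  induction s with
  | nil => exact pvRepl_nil hne
  | cons c t ih =>
    have hp : ¬ p.isPrefixOf (c :: t) = true := by
      intro hc
      exact h ⟨0, by simpa using List.isPrefixOf_iff_prefix.mp hc⟩
    rw [pvRepl_cons_neg hne hp, ih (fun hocc => h (occ_cons.mpr (Or.inr hocc)))]

theorem no_create {p r : List Char} (hne : p ≠ []) (_hp : p ∈ pvPats) (hin : pvInert r)
    (hgh : ∃ c bs, r = c :: bs ∧ pvGoodC c = true) :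
    ∀ s, ∀ p' ∈ pvPats, pvOcc p' (pvRepl p r hne s) → pvOcc p' s := by
  suffices h : ∀ n (s : List Char), s.length ≤ n → ∀ p' ∈ pvPats,
      pvOcc p' (pvRepl p r hne s) → pvOcc p' s from
    fun s p' hp' => h s.length s (le_refl _) p' hp'
  intro n
  induction n with
  | zero =>
    intro s hs p' hp' hocc
    have : s = [] := by cases s <;> simp_all
    subst this
    rw [pvRepl_nil] at hocc
    obtain ⟨j, hj⟩ := hocc
    rw [List.drop_nil] at hj
    exact absurd (List.prefix_nil.mp hj) (fact_ne _ hp')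
  | succ n ih =>
    intro s hs p' hp' hocc
    cases s with
    | nil =>
      rw [pvRepl_nil] at hocc
      obtain ⟨j, hj⟩ := hocc
      rw [List.drop_nil] at hj
      exact absurd (List.prefix_nil.mp hj) (fact_ne _ hp')
    | cons c t =>
      by_cases hpf : p.isPrefixOf (c :: t) = true
      · rw [pvRepl_cons_pos hne hpf] at hocc
        rcases occ_append_elim hocc with ⟨j, hj, hpre⟩ | hocc2
        · exact absurd hpre (hin j hj _ p' hp')
        · have hlen : p.length ≤ (c :: t).length :=
            (List.isPrefixOf_iff_prefix.mp hpf).length_le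
          have h1 : 0 < p.length := List.length_pos_of_ne_nil hne
          have := ih _ (by simp only [List.length_drop, List.length_cons] at *; omega) p' hp' hocc2
          exact occ_drop this
      · rw [pvRepl_cons_neg hne hpf] at hocc
        rcases occ_cons.mp hocc with hpre | hocc2
        · rcases prefix_cons_cases hpre with rfl | ⟨q, rfl, hq⟩
          · exact absurd rfl (fact_ne _ hp')
          · have hqchars : ∀ ch ∈ q, pvGoodC ch = false :=
              fun ch hch => fact_chars _ hp' ch (by simp [hch])
            have hqt : q <+: t := gp_pullback (gp_repl hne hgh t) hqchars hq
            refine ⟨0, ?_⟩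
            simpa using (List.cons_prefix_cons.mpr ⟨rfl, hqt⟩ : c :: q <+: c :: t)
        · exact occ_cons.mpr (Or.inr (ih t (by simp at hs; omega) p' hp' hocc2))

-- ---- the chains ----
def pvUChain (ts : List (List Char × List Char)) (l : List Char) : List Char :=
  ts.foldl (fun acc pr => PySem.Chars.replace acc pr.1 pr.2) l

def pvCondChain (ts : List (List Char × List Char)) (l0 l : List Char) : List Char :=
  ts.foldl (fun acc pr => if PySem.Chars.isIn pr.1 l0 then PySem.Chars.replace acc pr.1 pr.2 else acc) l

theorem gp_uchain {ts : List (List Char × List Char)} (hg : ∀ pr ∈ ts, pvGoodEntry pr)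
    (s : List Char) : pvGP s (pvUChain ts s) := by
  induction ts generalizing s with
  | nil => exact gp_refl s
  | cons pr ts ih =>
    obtain ⟨hp1, hp2, _, hgh⟩ := hg pr (List.mem_cons_self)
    have hne1 : pr.1 ≠ [] := fact_ne _ hp1
    have hstep : pvUChain (pr :: ts) s = pvUChain ts (pvRepl pr.1 pr.2 hne1 s) := by
      simp [pvUChain, List.foldl_cons, replace_eq_pvRepl hne1]
    rw [hstep]
    exact gp_trans (gp_repl hne1 hgh s) (ih (fun pr' h' => hg pr' (List.mem_cons_of_mem _ h')) _)

theorem uchain_nil {ts : List (List Char × List Char)} (hg : ∀ pr ∈ ts, pvGoodEntry pr) :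
    pvUChain ts [] = [] := by
  induction ts with
  | nil => rfl
  | cons pr ts ih =>
    obtain ⟨hp1, _, _, _⟩ := hg pr (List.mem_cons_self)
    have hne1 : pr.1 ≠ [] := fact_ne _ hp1
    have hstep : pvUChain (pr :: ts) [] = pvUChain ts (pvRepl pr.1 pr.2 hne1 []) := by
      simp [pvUChain, List.foldl_cons, replace_eq_pvRepl hne1]
    rw [hstep, pvRepl_nil]
    exact ih (fun pr' h' => hg pr' (List.mem_cons_of_mem _ h'))

theorem uchain_cons' {t X : List Char} {c : Char} :
    ∀ ts : List (List Char × List Char), (∀ pr ∈ ts, pvGoodEntry pr) → pvGP t X →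
    (∀ pr ∈ ts, ¬ pr.1 <+: (c :: t)) → pvUChain ts (c :: X) = c :: pvUChain ts X := by
  intro ts
  induction ts generalizing X with
  | nil => intro _ _ _; rfl
  | cons pr ts ih =>
    intro hg hGP hpre
    obtain ⟨hp1, _, _, hgh⟩ := hg pr (List.mem_cons_self)
    have hne1 : pr.1 ≠ [] := fact_ne _ hp1
    have hnp : ¬ pr.1 <+: (c :: X) := by
      intro hc
      rcases prefix_cons_cases hc with h0 | ⟨q, hq, hqX⟩
      · exact hne1 h0
      · have hqchars : ∀ ch ∈ q, pvGoodC ch = false :=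
          fun ch hch => fact_chars _ hp1 ch (by simp [hq, hch])
        have hqt : q <+: t := gp_pullback hGP hqchars hqX
        exact hpre pr (List.mem_cons_self) (by rw [hq]; exact List.cons_prefix_cons.mpr ⟨rfl, hqt⟩)
    have hstep : pvUChain (pr :: ts) (c :: X) = pvUChain ts (pvRepl pr.1 pr.2 hne1 (c :: X)) := by
      simp [pvUChain, List.foldl_cons, replace_eq_pvRepl hne1]
    rw [hstep, pvRepl_cons_neg hne1 (by simpa [List.isPrefixOf_iff_prefix] using hnp)]
    have hstep2 : pvUChain (pr :: ts) X = pvUChain ts (pvRepl pr.1 pr.2 hne1 X) := by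
      simp [pvUChain, List.foldl_cons, replace_eq_pvRepl hne1]
    rw [hstep2]
    exact ih (fun pr' h' => hg pr' (List.mem_cons_of_mem _ h'))
      (gp_trans hGP (gp_repl hne1 hgh X)) (fun pr' h' => hpre pr' (List.mem_cons_of_mem _ h'))

theorem seg1 {pk rest : List Char} (hpk : pk ∈ pvPats) :
    ∀ ts : List (List Char × List Char), (∀ pr ∈ ts, pvGoodEntry pr) → ∀ X, pvGP rest X →
    (∀ pr ∈ ts, ¬ pr.1 <+: (pk ++ rest)) →
    pvUChain ts (pk ++ X) = pk ++ pvUChain ts X := by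
  intro ts
  induction ts with
  | nil => intro _ X _ _; rfl
  | cons pr ts ih =>
    intro hg X hGP hpre
    obtain ⟨hp1, _, _, hgh⟩ := hg pr (List.mem_cons_self)
    have hne1 : pr.1 ≠ [] := fact_ne _ hp1
    have hcond : ∀ j, j < pk.length → ¬ pr.1 <+: (pk.drop j ++ X) := by
      intro j hj hc
      by_cases hj0 : j = 0
      · subst hj0
        simp only [List.drop_zero] at hc
        rcases prefix_append_cases hc with hu | ⟨q, hq, hqX⟩
        · exact hpre pr (List.mem_cons_self) (hu.trans (List.prefix_append pk rest))
        · have hqchars : ∀ ch ∈ q, pvGoodC ch = false :=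
            fun ch hch => fact_chars _ hp1 ch (by simp [hq, hch])
          have hqr : q <+: rest := gp_pullback hGP hqchars hqX
          exact hpre pr (List.mem_cons_self)
            (by rw [hq]; exact (List.prefix_append_right_inj pk).mpr hqr)
      · have hov := fact_overlap pk hpk pr.1 hp1 j hj (by omega)
        rcases prefix_append_cases hc with hu | ⟨q, hq, _⟩
        · exact hov.1 hu
        · exact hov.2 ⟨q, hq.symm⟩
    have hstep : pvUChain (pr :: ts) (pk ++ X) = pvUChain ts (pvRepl pr.1 pr.2 hne1 (pk ++ X)) := by
      simp [pvUChain, List.foldl_cons, replace_eq_pvRepl hne1]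
    rw [hstep, skip_prefix hne1 pk X hcond]
    have hstep2 : pvUChain (pr :: ts) X = pvUChain ts (pvRepl pr.1 pr.2 hne1 X) := by
      simp [pvUChain, List.foldl_cons, replace_eq_pvRepl hne1]
    rw [hstep2]
    exact ih (fun pr' h' => hg pr' (List.mem_cons_of_mem _ h'))
      (pvRepl pr.1 pr.2 hne1 X) (gp_trans hGP (gp_repl hne1 hgh X))
      (fun pr' h' => hpre pr' (List.mem_cons_of_mem _ h'))

theorem seg2 {rk rest : List Char} (hin : pvInert rk) :
    ∀ ts : List (List Char × List Char), (∀ pr ∈ ts, pvGoodEntry pr) → ∀ X, pvGP rest X →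
    pvUChain ts (rk ++ X) = rk ++ pvUChain ts X := by
  intro ts
  induction ts with
  | nil => intro _ X _; rfl
  | cons pr ts ih =>
    intro hg X hGP
    obtain ⟨hp1, _, _, hgh⟩ := hg pr (List.mem_cons_self)
    have hne1 : pr.1 ≠ [] := fact_ne _ hp1
    have hcond : ∀ j, j < rk.length → ¬ pr.1 <+: (rk.drop j ++ X) :=
      fun j hj => hin j hj X pr.1 hp1
    have hstep : pvUChain (pr :: ts) (rk ++ X) = pvUChain ts (pvRepl pr.1 pr.2 hne1 (rk ++ X)) := by
      simp [pvUChain, List.foldl_cons, replace_eq_pvRepl hne1]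
    rw [hstep, skip_prefix hne1 rk X hcond]
    have hstep2 : pvUChain (pr :: ts) X = pvUChain ts (pvRepl pr.1 pr.2 hne1 X) := by
      simp [pvUChain, List.foldl_cons, replace_eq_pvRepl hne1]
    rw [hstep2]
    exact ih (fun pr' h' => hg pr' (List.mem_cons_of_mem _ h'))
      (pvRepl pr.1 pr.2 hne1 X) (gp_trans hGP (gp_repl hne1 hgh X))

theorem pvScan_nil {ts : List (List Char × List Char)} (hne : ∀ pr ∈ ts, pr.1 ≠ []) :
    pvScan ts hne [] = [] := by
  rw [pvScan]

theorem pvScan_cons_none {ts : List (List Char × List Char)} (hne : ∀ pr ∈ ts, pr.1 ≠ [])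
    {c : Char} {t : List Char}
    (hm : ts.find? (fun pr => pr.1.isPrefixOf (c :: t)) = none) :
    pvScan ts hne (c :: t) = c :: pvScan ts hne t := by
  rw [pvScan, hm]

theorem pvScan_cons_some {ts : List (List Char × List Char)} (hne : ∀ pr ∈ ts, pr.1 ≠ [])
    {c : Char} {t : List Char} {pr : List Char × List Char}
    (hm : ts.find? (fun pr => pr.1.isPrefixOf (c :: t)) = some pr) :
    pvScan ts hne (c :: t) = pr.2 ++ pvScan ts hne ((c :: t).drop pr.1.length) := by
  rw [pvScan, hm]

theorem find?_split {α : Type} (p : α → Bool) :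
    ∀ (ts : List α) (a : α), ts.find? p = some a →
      ∃ ts1 ts2, ts = ts1 ++ a :: ts2 ∧ ∀ x ∈ ts1, p x = false := by
  intro ts
  induction ts with
  | nil => intro a h; simp at h
  | cons x ts ih =>
    intro a h
    cases hpx : p x with
    | true =>
      rw [List.find?_cons_of_pos hpx] at h
      exact ⟨[], ts, by simp [Option.some_inj.mp h], by simp⟩
    | false =>
      rw [List.find?_cons_of_neg (by simp [hpx])] at h
      obtain ⟨ts1, ts2, rfl, hts1⟩ := ih a h
      refine ⟨x :: ts1, ts2, by simp, ?_⟩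
      intro x' hx'
      rcases List.mem_cons.mp hx' with rfl | hmem
      · exact hpx
      · exact hts1 x' hmem

theorem uchain_append (a b : List (List Char × List Char)) (l : List Char) :
    pvUChain (a ++ b) l = pvUChain b (pvUChain a l) := by
  simp [pvUChain, List.foldl_append]

theorem repl_self_prefix {pk rk : List Char} (hne : pk ≠ []) (Y : List Char) :
    pvRepl pk rk hne (pk ++ Y) = rk ++ pvRepl pk rk hne Y := by
  obtain ⟨c, t, hpk⟩ := List.exists_cons_of_ne_nil hne
  have h1 : pk ++ Y = c :: (t ++ Y) := by rw [hpk]; simp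
  rw [h1, pvRepl_cons_pos hne (by
    rw [← h1]
    exact List.isPrefixOf_iff_prefix.mpr (List.prefix_append pk Y))]
  congr 1
  have h2 : (c :: (t ++ Y)).drop pk.length = Y := by
    rw [← h1, List.drop_left]
  rw [h2]

theorem main_chain {ts : List (List Char × List Char)} (hg : ∀ pr ∈ ts, pvGoodEntry pr)
    (hne : ∀ pr ∈ ts, pr.1 ≠ []) :
    ∀ l, pvUChain ts l = pvScan ts hne l := by
  suffices h : ∀ n (l : List Char), l.length ≤ n → pvUChain ts l = pvScan ts hne l from
    fun l => h l.length l (le_refl _)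
  intro n
  induction n with
  | zero =>
    intro l hl
    have : l = [] := by cases l <;> simp_all
    subst this
    rw [uchain_nil hg, pvScan_nil]
  | succ n ihn =>
    intro l hl
    cases l with
    | nil => rw [uchain_nil hg, pvScan_nil]
    | cons c t =>
      cases hm : ts.find? (fun pr => pr.1.isPrefixOf (c :: t)) with
      | none =>
        have hnp : ∀ pr ∈ ts, ¬ pr.1 <+: (c :: t) := by
          intro pr hpr hc
          have := List.find?_eq_none.mp hm pr hpr
          simp [List.isPrefixOf_iff_prefix] at this
          exact this hc
        rw [pvScan_cons_none hne hm, ← ihn t (by simp at hl; omega)]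
        exact uchain_cons' ts hg (gp_refl t) hnp
      | some pr0 =>
        have hpr0 : pr0 ∈ ts := List.mem_of_find?_eq_some hm
        obtain ⟨hp1, _, hin0, _⟩ := hg pr0 hpr0
        have hne0 : pr0.1 ≠ [] := fact_ne _ hp1
        have hpre0 : pr0.1 <+: (c :: t) := by
          have := List.find?_some hm
          simpa [List.isPrefixOf_iff_prefix] using this
        obtain ⟨rest, hrest⟩ := hpre0
        obtain ⟨ts1, ts2, hts, hts1⟩ := find?_split _ ts pr0 hm
        have hg1 : ∀ pr ∈ ts1, pvGoodEntry pr := by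
          intro pr h'; exact hg pr (by rw [hts]; simp [h'])
        have hg2 : ∀ pr ∈ ts2, pvGoodEntry pr := by
          intro pr h'; exact hg pr (by rw [hts]; simp [h'])
        have hearly : ∀ pr ∈ ts1, ¬ pr.1 <+: (pr0.1 ++ rest) := by
          intro pr h' hc
          have hb : pr.1.isPrefixOf (c :: t) = false := by simpa using hts1 pr h'
          rw [hrest] at hc
          rw [List.isPrefixOf_iff_prefix.mpr hc] at hb
          exact Bool.true_eq_false.mp hb
        -- split the chain into the three segments
        have hsplit1 : pvUChain ts (c :: t) = pvUChain ts2 (pvUChain [pr0] (pvUChain ts1 (c :: t))) := by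
          rw [hts]
          rw [show ts1 ++ pr0 :: ts2 = (ts1 ++ [pr0]) ++ ts2 by simp]
          rw [uchain_append, uchain_append]
        have hseg1 : pvUChain ts1 (c :: t) = pr0.1 ++ pvUChain ts1 rest := by
          rw [← hrest]
          exact seg1 hp1 ts1 hg1 rest (gp_refl rest) hearly
        have hmid : pvUChain [pr0] (pr0.1 ++ pvUChain ts1 rest)
            = pr0.2 ++ pvUChain (ts1 ++ [pr0]) rest := by
          have : pvUChain [pr0] (pr0.1 ++ pvUChain ts1 rest)
              = pvRepl pr0.1 pr0.2 hne0 (pr0.1 ++ pvUChain ts1 rest) := by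
            simp [pvUChain, List.foldl_cons, replace_eq_pvRepl hne0]
          rw [this, repl_self_prefix hne0]
          rw [uchain_append]
          congr 1
          simp [pvUChain, List.foldl_cons, replace_eq_pvRepl hne0]
        have hseg2 : pvUChain ts2 (pr0.2 ++ pvUChain (ts1 ++ [pr0]) rest)
            = pr0.2 ++ pvUChain ts2 (pvUChain (ts1 ++ [pr0]) rest) := by
          refine seg2 (rest := rest) hin0 ts2 hg2 _ ?_
          refine gp_uchain ?_ rest
          intro pr h'
          rcases List.mem_append.mp h' with h'' | h''
          · exact hg1 pr h''
          · rw [List.mem_singleton.mp h'']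
            exact hg pr0 hpr0
        have hall : pvUChain ts2 (pvUChain (ts1 ++ [pr0]) rest) = pvUChain ts rest := by
          rw [← uchain_append]
          congr 1
          rw [hts]; simp
        have hlenrest : rest.length ≤ n := by
          have h0 : 0 < pr0.1.length := List.length_pos_of_ne_nil hne0
          have := congrArg List.length hrest
          simp at this hl
          omega
        rw [hsplit1, hseg1, hmid, hseg2, hall, ihn rest hlenrest,
          pvScan_cons_some hne hm]
        congr 2
        rw [← hrest, List.drop_left]

theorem cond_eq_u_aux {l : List Char} :
    ∀ (ts : List (List Char × List Char)), (∀ pr ∈ ts, pvGoodEntry pr) →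
    ∀ acc, (∀ p' ∈ pvPats, pvOcc p' acc → pvOcc p' l) →
    pvCondChain ts l acc = pvUChain ts acc := by
  intro ts
  induction ts with
  | nil => intro _ acc _; rfl
  | cons pr ts ih =>
    intro hg acc hinv
    obtain ⟨hp1, _, hin1, hgh1⟩ := hg pr List.mem_cons_self
    have hne1 : pr.1 ≠ [] := fact_ne _ hp1
    have hgt : ∀ pr' ∈ ts, pvGoodEntry pr' := fun pr' h' => hg pr' (List.mem_cons_of_mem _ h')
    have hinv' : ∀ p' ∈ pvPats, pvOcc p' (pvRepl pr.1 pr.2 hne1 acc) → pvOcc p' l :=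
      fun p' hp' hocc => hinv p' hp' (no_create hne1 hp1 hin1 hgh1 acc p' hp' hocc)
    by_cases hc : PySem.Chars.isIn pr.1 l = true
    · have h1 : pvCondChain (pr :: ts) l acc = pvCondChain ts l (PySem.Chars.replace acc pr.1 pr.2) := by
        simp [pvCondChain, List.foldl_cons, hc]
      have h2 : pvUChain (pr :: ts) acc = pvUChain ts (PySem.Chars.replace acc pr.1 pr.2) := by
        simp [pvUChain, List.foldl_cons]
      rw [h1, h2, replace_eq_pvRepl hne1]
      exact ih hgt _ hinv'
    · have hnocc : ¬ pvOcc pr.1 acc := by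
        intro hocc
        exact hc (occ_iff_isIn.mp (hinv pr.1 hp1 hocc))
      have h1 : pvCondChain (pr :: ts) l acc = pvCondChain ts l acc := by
        simp [pvCondChain, List.foldl_cons, hc]
      have h2 : pvUChain (pr :: ts) acc = pvUChain ts (PySem.Chars.replace acc pr.1 pr.2) := by
        simp [pvUChain, List.foldl_cons]
      rw [h1, h2, replace_eq_pvRepl hne1, repl_id hne1 hnocc]
      exact ih hgt acc hinv
theorem cond_eq_u {ts : List (List Char × List Char)} (hg : ∀ pr ∈ ts, pvGoodEntry pr)
    (l : List Char) : pvCondChain ts l l = pvUChain ts l := by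
  exact cond_eq_u_aux ts hg l (fun _ _ h => h)

theorem chains_eq (y : Int) (l : List Char) :
    pvCondChain (pvTable y) l l = pvScan (pvTable y) (pvTable_ne y) l := by
  rw [cond_eq_u (table_good y) l, main_chain (table_good y) (pvTable_ne y) l]

-- ===== VERDICT (by name: the statement is the Claim_ definition above) =====
theorem process_time_relative_query_spec : Claim_equal_process_time_relative_query := by
  intro query current_datetime _ _
  unfold Spec_process_time_relative_query
  unfold process_time_relative_query process_time_relative_query_alt
  cases hy : (PySem.Dict.mk current_datetime).get? "year" with
  | none => simp
  | some y =>
    simp only []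
    have hfold : ∀ ql : List Char,
        ([ ((['l','a','s','t',' ','y','e','a','r'] : List Char), (Sum.inl (y - 1) : Int ⊕ (Int × Int))),
           (['t','h','i','s',' ','y','e','a','r'], .inl y),
           (['n','e','x','t',' ','y','e','a','r'], .inl (y + 1)),
           (['p','r','e','v','i','o','u','s',' ','y','e','a','r'], .inl (y - 1)),
           (['c','o','m','i','n','g',' ','y','e','a','r'], .inl (y + 1)),
           (['t','w','o',' ','y','e','a','r','s',' ','a','g','o'], .inl (y - 2)),
           (['t','h','r','e','e',' ','y','e','a','r','s',' ','a','g','o'], .inl (y - 3)),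
           (['l','a','s','t',' ','d','e','c','a','d','e'], .inr (y - 10, y - 1)) ]).foldl (fun acc tv =>
            if PySem.Chars.isIn tv.1 ql then
              match tv.2 with
              | .inr ab => PySem.Chars.replace acc tv.1 (pvDecadeRep ab.1 ab.2)
              | .inl v => PySem.Chars.replace acc tv.1 (PySem.Int.toChars v)
            else acc) ql = pvCondChain (pvTable y) ql ql := by
      intro ql
      simp [pvCondChain, pvTable, List.foldl]
    rw [hfold, chains_eq]
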